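-- pv_equiv track=rewrite | github.com/dharan31chase/voice-to-notion-ai | scripts/intelligent_router.py | detect_special_tags
-- ===== SOURCE A (Python) =====
-- def detect_special_tags(content):
--     """Detect if task needs special tags like Communications or Needs Jessica Input"""
--
--     content_lower = content.lower()
--     tags = []
--
--     # Communications: ACTUAL communication with people (not just any "update")
--     comm_patterns = [
--         "call", "email", "text", "message", "phone",
--         "update parents", "contact", "coordinate with",
--         "reach out", "follow up with", "send to",
--         "notify", "inform", "tell"
--     ]
--
--     # More specific matching - look for communication + person/entity
--     is_communication = False
--     for pattern in comm_patterns: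
--         if pattern in content_lower:
--             # Additional check: make sure it's about communicating with people
--             people_indicators = ["parents", "team", "client", "customer", "person", "people", "someone", "them", "him", "her"]
--             if any(indicator in content_lower for indicator in people_indicators) or pattern in ["call", "email", "text", "message", "phone"]:
--                 is_communication = True
--                 break
--
--     if is_communication:
--         tags.append("Communications")
--
--     # Needs Jessica Input: home, baby, green card decisions
--     jessica_keywords = ["home remodel", "baby", "green card", "major decision", "couple decision", "jessica"]
--     if any(keyword in content_lower for keyword in jessica_keywords):
--         tags.append("Needs Jessica Input")
--
--     return tags
-- ===== SOURCE B (Python) =====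
-- def detect_special_tags(content):
--     """Detect if task needs special tags like Communications or Needs Jessica Input"""
--     content_lower = content.lower()
--
--     comm_patterns = [
--         "call", "email", "text", "message", "phone",
--         "update parents", "contact", "coordinate with",
--         "reach out", "follow up with", "send to",
--         "notify", "inform", "tell"
--     ]
--     basic_words = ["call", "email", "text", "message", "phone"]
--     people_indicators = ["parents", "team", "client", "customer", "person",
--                          "people", "someone", "them", "him", "her"]
--     jessica_keywords = ["home remodel", "baby", "green card", "major decision",
--                         "couple decision", "jessica"]
--
--     has_comm = any(p in content_lower for p in comm_patterns)
--     has_person = any(i in content_lower for i in people_indicators)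
--     has_basic = any(w in content_lower for w in basic_words)
--
--     tags = []
--     if (has_comm and has_person) or has_basic:
--         tags.append("Communications")
--     if any(k in content_lower for k in jessica_keywords):
--         tags.append("Needs Jessica Input")
--     return tags
-- ===== Notes on version B (the rewrite author's own statement) =====
-- stated objective: simpler
-- what changed: Replaces A's per-pattern loop with break and an inner per-pattern people/basic check by three flat boolean flags (any comm pattern, any people indicator, any basic word) combined as (has_comm and has_person) or has_basic, correct because the five basic words are a subset of the comm patterns.
import Mathlib
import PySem

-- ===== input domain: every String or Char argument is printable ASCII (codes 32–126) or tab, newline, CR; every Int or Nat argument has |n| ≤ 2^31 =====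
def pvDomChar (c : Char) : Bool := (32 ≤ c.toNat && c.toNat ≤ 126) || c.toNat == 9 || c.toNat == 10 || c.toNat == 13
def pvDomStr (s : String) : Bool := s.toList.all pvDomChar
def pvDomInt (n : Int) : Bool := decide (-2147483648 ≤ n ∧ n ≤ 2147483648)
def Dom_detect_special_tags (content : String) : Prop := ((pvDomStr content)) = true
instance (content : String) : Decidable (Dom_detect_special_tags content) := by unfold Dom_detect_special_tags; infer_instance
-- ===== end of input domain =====

-- B replaces A's per-pattern loop-with-break by three flat boolean flags (any comm pattern / any
-- people indicator / any basic word) combined as (has_comm && has_person) || has_basic; simpler.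


-- ===== PORT A =====
def pvCommPatterns : List String :=
  ["call", "email", "text", "message", "phone",
   "update parents", "contact", "coordinate with",
   "reach out", "follow up with", "send to",
   "notify", "inform", "tell"]

def pvPeopleIndicators : List String :=
  ["parents", "team", "client", "customer", "person", "people", "someone", "them", "him", "her"]

def pvJessicaKeywords : List String :=
  ["home remodel", "baby", "green card", "major decision", "couple decision", "jessica"]

-- the 'for pattern in comm_patterns: … break' loop over the is_communication flag
def pvCommLoop (cl : String) : List String → Bool
  | [] => false
  | p :: rest =>
    if PySem.Str.isIn p cl then
      if pvPeopleIndicators.any (fun ind => PySem.Str.isIn ind cl)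
         || ["call", "email", "text", "message", "phone"].contains p then
        true  -- is_communication = True; break
      else pvCommLoop cl rest
    else pvCommLoop cl rest

def detect_special_tags (content : String) : List String :=
  let content_lower := PySem.Str.lower content
  let tags : List String := []
  let is_communication := pvCommLoop content_lower pvCommPatterns
  let tags := if is_communication then tags ++ ["Communications"] else tags
  let tags := if pvJessicaKeywords.any (fun k => PySem.Str.isIn k content_lower) then
                tags ++ ["Needs Jessica Input"] else tags
  tags

-- ===== PORT B =====
def pvBasicWords : List String := ["call", "email", "text", "message", "phone"]

def detect_special_tags_alt (content : String) : List String :=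
  let content_lower := PySem.Str.lower content
  let has_comm := pvCommPatterns.any (fun p => PySem.Str.isIn p content_lower)
  let has_person := pvPeopleIndicators.any (fun i => PySem.Str.isIn i content_lower)
  let has_basic := pvBasicWords.any (fun w => PySem.Str.isIn w content_lower)
  let tags : List String := []
  let tags := if (has_comm && has_person) || has_basic then tags ++ ["Communications"] else tags
  let tags := if pvJessicaKeywords.any (fun k => PySem.Str.isIn k content_lower) then
                tags ++ ["Needs Jessica Input"] else tags
  tags

-- ===== PRECONDITION & SPEC =====
def Spec_detect_special_tags (content : String) (out : List String) : Prop := out = detect_special_tags_alt content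
instance (content : String) (out : List String) : Decidable (Spec_detect_special_tags content out) := by unfold Spec_detect_special_tags; infer_instance

-- ===== CLAIM (what is proved, stated in full; the proofs are below) =====
def Claim_equal_detect_special_tags : Prop := ∀ (content : String), Dom_detect_special_tags content → Spec_detect_special_tags content (detect_special_tags content)

-- ===== LEMMAS AND PROOFS =====
-- A's loop, on any pattern list, computes (any pattern && any people) || any basic pattern
theorem pvCommLoop_eq (cl : String) (ps : List String) :
    pvCommLoop cl ps =
      ((ps.any (fun p => PySem.Str.isIn p cl)
          && pvPeopleIndicators.any (fun i => PySem.Str.isIn i cl))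
        || ps.any (fun p => ["call", "email", "text", "message", "phone"].contains p
                            && PySem.Str.isIn p cl)) := by
  induction ps with
  | nil => simp [pvCommLoop]
  | cons p rest ih =>
    simp only [pvCommLoop, List.any_cons]
    rw [ih]
    cases h1 : PySem.Str.isIn p cl <;>
      cases h2 : (["call", "email", "text", "message", "phone"] : List String).contains p <;>
      cases h3 : pvPeopleIndicators.any (fun i => PySem.Str.isIn i cl) <;>
      simp [h1, h2, h3]

-- specialised to the literal lists: the basic-word part collapses to pvBasicWords
theorem pvCommLoop_eq_flags (cl : String) :
    pvCommLoop cl pvCommPatterns =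
      ((pvCommPatterns.any (fun p => PySem.Str.isIn p cl)
          && pvPeopleIndicators.any (fun i => PySem.Str.isIn i cl))
        || pvBasicWords.any (fun w => PySem.Str.isIn w cl)) := by
  rw [pvCommLoop_eq]
  congr 1 <;> simp [pvCommPatterns, pvBasicWords]

-- ===== VERDICT (by name: the statement is the Claim_ definition above) =====
theorem detect_special_tags_spec : Claim_equal_detect_special_tags := by
  intro content _
  unfold Spec_detect_special_tags
  simp only [detect_special_tags, detect_special_tags_alt, pvCommLoop_eq_flags]
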